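-- pv_equiv track=rewrite | github.com/miliar/Code_Jam_Webscraper | solutions_python/Problem_2/461.py | trains
-- ===== SOURCE A (Python) =====
-- def cant_times( time , l_time ) :
-- 	c = 0
-- 	for el in l_time :
-- 		if el == time :
-- 			c +=1
-- 	return c
--
-- def trains( from_a , from_b , to_a , to_b ) :
-- 	in_a = 0
-- 	in_b = 0
-- 	a = 0
-- 	b = 0
-- 	for time in range( 24 * 60 ) :
-- 		if time in to_a :
-- 			in_a += cant_times( time , to_a )
-- 		if time in to_b :
-- 			in_b += cant_times( time , to_b )
-- 		if time in from_a :
-- 			if in_a == 0 :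
-- 				a += cant_times( time , from_a )
-- 			else :
-- 				in_a -= cant_times( time , from_a )
-- 				if in_a < 0 :
-- 					a+= abs(in_a)
-- 					in_a = 0
-- 		if time in from_b :
-- 			if in_b == 0 :
-- 				b += cant_times( time , from_b )
-- 			else :
-- 				in_b -= cant_times( time , from_b )
-- 				if in_b < 0 :
-- 					b+= abs(in_b)
-- 					in_b = 0
--
-- 	return a , b
-- ===== SOURCE B (Python) =====
-- def _ctr(times):
--     d = {}
--     for t in times:
--         if 0 <= t < 1440:
--             d[t] = d.get(t, 0) + 1
--     return d
--
--
-- def _extra(departs, arrives):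
--     deps = _ctr(departs)
--     arrs = _ctr(arrives)
--     avail = 0
--     extra = 0
--     for t in sorted(set(deps) | set(arrs)):
--         avail += arrs.get(t, 0)
--         need = deps.get(t, 0)
--         if need > avail:
--             extra += need - avail
--             avail = 0
--         else:
--             avail -= need
--     return extra
--
--
-- def trains(from_a, from_b, to_a, to_b):
--     return _extra(from_a, to_a), _extra(from_b, to_b)
-- ===== Notes on version B (the rewrite author's own statement) =====
-- stated objective: faster
-- what changed: Replaces A's scan over all 1440 minutes with per-minute membership tests and repeated counting passes by one-pass count dictionaries per station and a single sweep over the sorted set of occurring in-range times.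
import Mathlib
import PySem

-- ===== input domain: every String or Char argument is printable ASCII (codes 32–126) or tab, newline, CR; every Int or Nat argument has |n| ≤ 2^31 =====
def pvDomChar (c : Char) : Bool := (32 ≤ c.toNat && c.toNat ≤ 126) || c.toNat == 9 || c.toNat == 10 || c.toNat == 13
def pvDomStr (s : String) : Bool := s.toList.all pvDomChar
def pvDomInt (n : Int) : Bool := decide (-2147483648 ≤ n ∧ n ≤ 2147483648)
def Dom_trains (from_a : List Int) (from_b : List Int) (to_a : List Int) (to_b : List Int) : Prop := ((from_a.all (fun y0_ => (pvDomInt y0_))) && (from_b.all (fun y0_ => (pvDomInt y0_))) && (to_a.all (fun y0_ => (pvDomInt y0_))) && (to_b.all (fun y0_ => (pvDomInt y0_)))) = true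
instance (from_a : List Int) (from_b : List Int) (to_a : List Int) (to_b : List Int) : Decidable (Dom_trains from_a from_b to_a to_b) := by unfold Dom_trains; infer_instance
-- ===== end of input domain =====

-- B replaces the scan over all 1440 minutes (with per-minute membership/count passes) by
-- per-station count dictionaries and one sweep over the sorted set of occurring in-range times.


-- ===== PORT A =====
def cant_times (time : Int) (l_time : List Int) : Int :=
  l_time.foldl (fun c el => if el == time then c + 1 else c) 0

def trains (from_a : List Int) (from_b : List Int) (to_a : List Int) (to_b : List Int) : Int × Int :=
  let st := (PySem.List.pyRange 0 (24 * 60) 1).foldl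
    (fun (s : Int × Int × Int × Int) time =>
      let in_a := s.1; let in_b := s.2.1; let a := s.2.2.1; let b := s.2.2.2
      let in_a := if time ∈ to_a then in_a + cant_times time to_a else in_a
      let in_b := if time ∈ to_b then in_b + cant_times time to_b else in_b
      let pa : Int × Int :=
        if time ∈ from_a then
          (if in_a = 0 then (in_a, a + cant_times time from_a)
           else
             let in_a := in_a - cant_times time from_a
             if in_a < 0 then (0, a + |in_a|) else (in_a, a))
        else (in_a, a)
      let pb : Int × Int :=
        if time ∈ from_b then
          (if in_b = 0 then (in_b, b + cant_times time from_b)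
           else
             let in_b := in_b - cant_times time from_b
             if in_b < 0 then (0, b + |in_b|) else (in_b, b))
        else (in_b, b)
      (pa.1, pb.1, pa.2, pb.2))
    (0, 0, 0, 0)
  (st.2.2.1, st.2.2.2)

-- ===== PORT B =====
def pvCtr (times : List Int) : PySem.Dict Int Int :=
  times.foldl (fun d t => if 0 ≤ t ∧ t < 1440 then d.insert t (d.getD t 0 + 1) else d)
    PySem.Dict.empty

def pvExtra (departs : List Int) (arrives : List Int) : Int :=
  let deps := pvCtr departs
  let arrs := pvCtr arrives
  let st := (PySem.List.sorted
      (PySem.Set.union (PySem.Set.ofList (PySem.Dict.keys deps)) (PySem.Dict.keys arrs))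
      (fun x => x) false).foldl
    (fun (s : Int × Int) t =>
      let avail := s.1 + arrs.getD t 0
      let need := deps.getD t 0
      if need > avail then (0, s.2 + (need - avail)) else (avail - need, s.2))
    (0, 0)
  st.2

def trains_alt (from_a : List Int) (from_b : List Int) (to_a : List Int) (to_b : List Int) : Int × Int :=
  (pvExtra from_a to_a, pvExtra from_b to_b)

-- ===== PRECONDITION & SPEC =====
def Spec_trains (from_a : List Int) (from_b : List Int) (to_a : List Int) (to_b : List Int) (out : Int × Int) : Prop := out = trains_alt from_a from_b to_a to_b
instance (from_a : List Int) (from_b : List Int) (to_a : List Int) (to_b : List Int) (out : Int × Int) : Decidable (Spec_trains from_a from_b to_a to_b out) := by unfold Spec_trains; infer_instance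

-- ===== CLAIM (what is proved, stated in full; the proofs are below) =====
def Claim_equal_trains : Prop := ∀ (from_a : List Int) (from_b : List Int) (to_a : List Int) (to_b : List Int), Dom_trains from_a from_b to_a to_b → Spec_trains from_a from_b to_a to_b (trains from_a from_b to_a to_b)

-- ===== LEMMAS AND PROOFS =====

-- A's loop body for one station (arrivals, then the departure branch), as a 2-state step
def gA (dep arr : List Int) (s : Int × Int) (t : Int) : Int × Int :=
  let ina := if t ∈ arr then s.1 + cant_times t arr else s.1
  if t ∈ dep then
    (if ina = 0 then (ina, s.2 + cant_times t dep)
     else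
       let ina2 := ina - cant_times t dep
       if ina2 < 0 then (0, s.2 + |ina2|) else (ina2, s.2))
  else (ina, s.2)

-- the canonical per-minute step with full-list counts
def stepB (dep arr : List Int) (s : Int × Int) (t : Int) : Int × Int :=
  let avail := s.1 + (arr.count t : Int)
  let need := (dep.count t : Int)
  if need > avail then (0, s.2 + (need - avail)) else (avail - need, s.2)
theorem cant_times_eq (t : Int) (l : List Int) : cant_times t l = (l.count t : Int) := by
  unfold cant_times
  rw [PySem.List.foldl_beq_add_one]
  simp

theorem stepB_nonneg (dep arr : List Int) (s : Int × Int) (t : Int) (_h : 0 ≤ s.1) :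
    0 ≤ (stepB dep arr s t).1 := by
  simp only [stepB]
  split_ifs <;> simp <;> omega

theorem gA_eq_stepB (dep arr : List Int) (s : Int × Int) (t : Int) (h : 0 ≤ s.1) :
    gA dep arr s t = stepB dep arr s t := by
  obtain ⟨av, ex⟩ := s
  by_cases hm : t ∈ arr <;> by_cases hd : t ∈ dep <;>
    simp only [gA, stepB, cant_times_eq, hm, hd, if_pos, if_neg, not_false_iff]
  · have hc : 1 ≤ (dep.count t : Int) := by exact_mod_cast List.count_pos_iff.mpr hd
    rcases abs_cases (av + (arr.count t : Int) - (dep.count t : Int)) with ⟨he, hs⟩ | ⟨he, hs⟩ <;>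
      rw [he] <;> split_ifs <;> (try (apply Prod.ext)) <;> simp <;> omega
  · simp only [List.count_eq_zero_of_not_mem hd, Nat.cast_zero]
    split_ifs <;> (try (apply Prod.ext)) <;> simp <;> omega
  · have hc : 1 ≤ (dep.count t : Int) := by exact_mod_cast List.count_pos_iff.mpr hd
    simp only [List.count_eq_zero_of_not_mem hm, Nat.cast_zero, add_zero]
    rcases abs_cases (av - (dep.count t : Int)) with ⟨he, hs⟩ | ⟨he, hs⟩ <;>
      rw [he] <;> split_ifs <;> (try (apply Prod.ext)) <;> simp <;> omega
  · simp only [List.count_eq_zero_of_not_mem hd, List.count_eq_zero_of_not_mem hm,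
      Nat.cast_zero, add_zero]
    split_ifs <;> (try (apply Prod.ext)) <;> simp <;> omega
theorem foldl_gA_filter (dep arr : List Int) (l : List Int) : ∀ (s : Int × Int), 0 ≤ s.1 →
    l.foldl (gA dep arr) s
      = (l.filter (fun t => decide (t ∈ dep ∨ t ∈ arr))).foldl (stepB dep arr) s := by
  induction l with
  | nil => intro s h; rfl
  | cons x xs ih =>
    intro s h
    by_cases hx : x ∈ dep ∨ x ∈ arr
    · rw [List.filter_cons_of_pos (by simp [hx])]
      simp only [List.foldl_cons]
      rw [gA_eq_stepB dep arr s x h]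
      exact ih _ (stepB_nonneg dep arr s x h)
    · rw [not_or] at hx
      have hskip : gA dep arr s x = s := by
        rw [gA_eq_stepB dep arr s x h]
        simp only [stepB, List.count_eq_zero_of_not_mem hx.1,
          List.count_eq_zero_of_not_mem hx.2, Nat.cast_zero, add_zero, sub_zero]
        split_ifs <;> (try (apply Prod.ext)) <;> simp <;> omega
      rw [List.filter_cons_of_neg (by simp [hx.1, hx.2])]
      simp only [List.foldl_cons, hskip]
      exact ih s h

def pvInRange (t : Int) : Bool := decide (0 ≤ t ∧ t < 1440)

theorem pvCtr_eq_counter (xs : List Int) :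
    pvCtr xs = PySem.Dict.counter (xs.filter pvInRange) := by
  unfold pvCtr
  rw [PySem.List.foldl_ite_eq_foldl_filter]
  rw [PySem.Dict.foldl_insert_getD_add_one_eq_counter]
  rfl

theorem getD_pvCtr (xs : List Int) (t : Int) (h : 0 ≤ t ∧ t < 1440) :
    (pvCtr xs).getD t 0 = (xs.count t : Int) := by
  rw [pvCtr_eq_counter, PySem.Dict.getD_counter]
  congr 1
  rw [List.count_filter]
  simp [pvInRange, h.1, h.2]

theorem keys_pvCtr (xs : List Int) :
    (pvCtr xs).keys = PySem.Set.ofList (xs.filter pvInRange) := by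
  rw [pvCtr_eq_counter, PySem.Dict.keys_counter]
theorem events_eq (dep arr : List Int) :
    PySem.List.sorted
        (PySem.Set.union (PySem.Set.ofList (PySem.Dict.keys (pvCtr dep))) (PySem.Dict.keys (pvCtr arr)))
        (fun x => x) false
      = (PySem.List.pyRange 0 1440 1).filter (fun t => decide (t ∈ dep ∨ t ∈ arr)) := by
  apply PySem.List.sorted_eq_of_perm_of_pairwise_lt
  · apply (List.perm_ext_iff_of_nodup ?_ ?_).mpr
    · intro t
      simp [keys_pvCtr, pvInRange, PySem.Set.mem_union, PySem.Set.mem_ofList,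
        PySem.List.mem_pyRange_one]
      tauto
    · exact (PySem.List.nodup_pyRange_one 0 1440).filter _
    · apply PySem.Set.nodup_union
      exact PySem.Set.nodup_ofList _
  · exact (PySem.List.pairwise_lt_pyRange_one 0 1440).filter _

theorem pvExtra_eq (dep arr : List Int) :
    pvExtra dep arr
      = (((PySem.List.pyRange 0 1440 1).filter (fun t => decide (t ∈ dep ∨ t ∈ arr))).foldl
          (stepB dep arr) (0, 0)).2 := by
  simp only [pvExtra]
  rw [events_eq]
  refine congrArg Prod.snd ?_
  apply PySem.List.foldl_congr_mem
  intro acc x hx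
  simp only [List.mem_filter, PySem.List.mem_pyRange_one, decide_eq_true_eq] at hx
  simp only [stepB, getD_pvCtr dep x ⟨hx.1.1, hx.1.2⟩, getD_pvCtr arr x ⟨hx.1.1, hx.1.2⟩]

theorem station_eq (dep arr : List Int) :
    ((PySem.List.pyRange 0 (24 * 60) 1).foldl (gA dep arr) (0, 0)).2 = pvExtra dep arr := by
  rw [pvExtra_eq]
  have h24 : (24 * 60 : Int) = 1440 := by norm_num
  rw [h24, foldl_gA_filter dep arr _ (0, 0) (by norm_num)]
theorem split4 (from_a from_b to_a to_b : List Int) (l : List Int) : ∀ (ia ib a0 b0 : Int),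
    l.foldl
      (fun (s : Int × Int × Int × Int) time =>
        let in_a := s.1; let in_b := s.2.1; let a := s.2.2.1; let b := s.2.2.2
        let in_a := if time ∈ to_a then in_a + cant_times time to_a else in_a
        let in_b := if time ∈ to_b then in_b + cant_times time to_b else in_b
        let pa : Int × Int :=
          if time ∈ from_a then
            (if in_a = 0 then (in_a, a + cant_times time from_a)
             else
               let in_a := in_a - cant_times time from_a
               if in_a < 0 then (0, a + |in_a|) else (in_a, a))
          else (in_a, a)
        let pb : Int × Int :=
          if time ∈ from_b then
            (if in_b = 0 then (in_b, b + cant_times time from_b)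
             else
               let in_b := in_b - cant_times time from_b
               if in_b < 0 then (0, b + |in_b|) else (in_b, b))
          else (in_b, b)
        (pa.1, pb.1, pa.2, pb.2))
      (ia, ib, a0, b0)
    = ((l.foldl (gA from_a to_a) (ia, a0)).1, (l.foldl (gA from_b to_b) (ib, b0)).1,
       (l.foldl (gA from_a to_a) (ia, a0)).2, (l.foldl (gA from_b to_b) (ib, b0)).2) := by
  induction l with
  | nil => intro ia ib a0 b0; rfl
  | cons x xs ih =>
    intro ia ib a0 b0
    simp only [List.foldl_cons]
    have h := ih (gA from_a to_a (ia, a0) x).1 (gA from_b to_b (ib, b0) x).1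
                 (gA from_a to_a (ia, a0) x).2 (gA from_b to_b (ib, b0) x).2
    simp only [Prod.mk.eta] at h
    exact h

theorem trains_spec : Claim_equal_trains := by
  intro from_a from_b to_a to_b _
  unfold Spec_trains
  simp only [trains, trains_alt]
  rw [split4]
  dsimp only
  rw [station_eq from_a to_a, station_eq from_b to_b]
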